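-- pv_equiv track=rewrite | github.com/wisest30/AlgoStudy | source/leetcode/1536/hyoseong.py | minSwaps
-- ===== SOURCE A (Python) =====
-- from typing import List
--
-- def minSwaps(grid: List[List[int]]) -> int:
--     A = []
--     for row in grid :
--         cnt = 0
--         for x in row[::-1] :
--             if x == 0 : cnt += 1
--             else : break
--         A.append(cnt)
--
--     ret = 0
--     for i in range(len(grid)) :
--         need_cnt = len(grid[i]) - (i+1)
--         if A[i] >= need_cnt : continue
--
--         idx = -1
--         for j in range(i+1, len(A)) :
--             if A[j] >= need_cnt :
--                 idx = j
--                 break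
--         else :
--             return -1
--
--         for j in range(idx, i, -1) :
--             A[j], A[j-1] = A[j-1], A[j]
--             ret += 1
--     return ret
-- ===== SOURCE B (Python) =====
-- from typing import List
--
-- def minSwaps(grid: List[List[int]]) -> int:
--     # trailing-zero count per row, scanning indices from the right (no reversal)
--     A = []
--     for row in grid:
--         k = len(row)
--         while k > 0 and row[k - 1] == 0:
--             k -= 1
--         A.append(len(row) - k)
--
--     ret = 0
--     for i in range(len(grid)):
--         need = len(grid[i]) - (i + 1)
--         if A[i] >= need:
--             continue
--         idx = next((j for j in range(i + 1, len(A)) if A[j] >= need), -1)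
--         if idx == -1:
--             return -1
--         # move A[idx] to position i in one step; bubble cost is idx - i
--         v = A[idx]
--         del A[idx]
--         A.insert(i, v)
--         ret += idx - i
--     return ret
-- ===== Notes on version B (the rewrite author's own statement) =====
-- stated objective: simpler
-- what changed: Phase 1 counts trailing zeros by decrementing an end index instead of iterating a reversed copy, and phase 2 replaces the inner adjacent-swap bubble loop by a single del/insert move plus the arithmetic cost idx - i.
import Mathlib
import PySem

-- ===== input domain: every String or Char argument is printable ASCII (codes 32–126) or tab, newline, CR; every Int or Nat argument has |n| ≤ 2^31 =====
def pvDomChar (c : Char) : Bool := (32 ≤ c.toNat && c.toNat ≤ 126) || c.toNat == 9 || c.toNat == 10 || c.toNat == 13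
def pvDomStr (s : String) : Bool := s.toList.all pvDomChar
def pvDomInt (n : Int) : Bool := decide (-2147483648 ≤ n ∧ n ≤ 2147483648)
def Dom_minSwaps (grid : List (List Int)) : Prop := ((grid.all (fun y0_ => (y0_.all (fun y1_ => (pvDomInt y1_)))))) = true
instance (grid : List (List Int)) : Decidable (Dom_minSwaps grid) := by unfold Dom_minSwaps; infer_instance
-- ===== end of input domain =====

-- B replaces A's inner adjacent-swap bubble loop by one del/insert move plus the cost idx - i,
-- and counts trailing zeros by an end index instead of iterating a reversed copy (objective: simpler).

-- ===== PORT A =====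
-- 'cnt = 0; for x in row[::-1]: if x == 0: cnt += 1 else: break'  (row[::-1] = row.reverse)
def tzLoopA : List Int → Int → Int
  | [], cnt => cnt
  | x :: xs, cnt => if x = 0 then tzLoopA xs (cnt + 1) else cnt

-- 'for j in range(i+1, len(A)): if A[j] >= need: idx = j; break  else: return -1' (none = the else branch)
def findA (A : List Int) (need : Int) (j : Nat) : Option Nat :=
  if j < A.length then
    if A.getD j 0 ≥ need then some j else findA A need (j + 1)
  else none
termination_by A.length - j

-- 'for j in range(idx, i, -1): A[j], A[j-1] = A[j-1], A[j]; ret += 1'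
def swapLoopA (A : List Int) (ret : Int) (i j : Nat) : List Int × Int :=
  if i < j then
    swapLoopA ((A.set j (A.getD (j - 1) 0)).set (j - 1) (A.getD j 0)) (ret + 1) i (j - 1)
  else (A, ret)
termination_by j

-- 'for i in range(len(grid)): …'
def loopA (grid : List (List Int)) (A : List Int) (ret : Int) (i : Nat) : Int :=
  if i < grid.length then
    if A.getD i 0 ≥ ((grid.getD i []).length : Int) - ((i : Int) + 1) then loopA grid A ret (i + 1)
    else
      match findA A (((grid.getD i []).length : Int) - ((i : Int) + 1)) (i + 1) with
      | none => -1
      | some idx =>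
        let p := swapLoopA A ret i idx
        loopA grid p.1 p.2 (i + 1)
  else ret
termination_by grid.length - i

def minSwaps (grid : List (List Int)) : Int :=
  loopA grid (grid.map (fun row => tzLoopA row.reverse 0)) 0 0

-- ===== PORT B =====
-- 'k = len(row); while k > 0 and row[k-1] == 0: k -= 1; return len(row) - k'
def tzLoopB (row : List Int) (k : Nat) : Int :=
  if 0 < k ∧ row.getD (k - 1) 0 = 0 then tzLoopB row (k - 1)
  else (row.length : Int) - (k : Int)
termination_by k

-- 'next((j for j in range(i+1, len(A)) if A[j] >= need), -1)' (none = -1 default)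
def findB (A : List Int) (need : Int) (j : Nat) : Option Nat :=
  if j < A.length then
    if A.getD j 0 ≥ need then some j else findB A need (j + 1)
  else none
termination_by A.length - j

-- 'v = A[idx]; del A[idx]; A.insert(i, v); ret += idx - i'  (idx < len A whenever reached)
def loopB (grid : List (List Int)) (A : List Int) (ret : Int) (i : Nat) : Int :=
  if i < grid.length then
    if A.getD i 0 ≥ ((grid.getD i []).length : Int) - ((i : Int) + 1) then loopB grid A ret (i + 1)
    else
      match findB A (((grid.getD i []).length : Int) - ((i : Int) + 1)) (i + 1) with
      | none => -1
      | some idx =>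
        loopB grid (PySem.List.insert (A.eraseIdx idx) (i : Int) (A.getD idx 0))
          (ret + ((idx : Int) - (i : Int))) (i + 1)
  else ret
termination_by grid.length - i

def minSwaps_alt (grid : List (List Int)) : Int :=
  loopB grid (grid.map (fun row => tzLoopB row row.length)) 0 0

-- ===== PRECONDITION & SPEC =====
def Spec_minSwaps (grid : List (List Int)) (out : Int) : Prop := out = minSwaps_alt grid
instance (grid : List (List Int)) (out : Int) : Decidable (Spec_minSwaps grid out) := by unfold Spec_minSwaps; infer_instance

-- ===== CLAIM (what is proved, stated in full; the proofs are below) =====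
def Claim_equal_minSwaps : Prop := ∀ (grid : List (List Int)), Dom_minSwaps grid → Spec_minSwaps grid (minSwaps grid)

-- ===== LEMMAS AND PROOFS =====

-- number of leading zeros (specification device for both trailing-zero loops)
def leadZeros : List Int → Nat
  | [] => 0
  | x :: xs => if x = 0 then leadZeros xs + 1 else 0

theorem tzLoopA_eq (l : List Int) : ∀ c : Int, tzLoopA l c = c + (leadZeros l : Int) := by
  induction l with
  | nil => intro c; simp [tzLoopA, leadZeros]
  | cons x xs ih =>
    intro c
    by_cases hx : x = 0
    · simp [tzLoopA, leadZeros, hx, ih]; ring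
    · simp [tzLoopA, leadZeros, hx]

theorem tzLoopB_eq (row : List Int) : ∀ k : Nat, k ≤ row.length →
    tzLoopB row k = ((row.length : Int) - k) + (leadZeros ((row.take k).reverse) : Int) := by
  intro k
  induction k with
  | zero => intro _; rw [tzLoopB]; simp [leadZeros]
  | succ n ih =>
    intro hk
    have hn : n < row.length := hk
    have hgd : row.getD n 0 = row[n] := by
      rw [List.getD_eq_getElem?_getD, List.getElem?_eq_getElem hn, Option.getD_some]
    have htake : (row.take (n + 1)).reverse = row[n] :: (row.take n).reverse := by
      rw [List.take_add_one]
      simp [hn]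
    rw [tzLoopB]
    simp only [Nat.add_sub_cancel]
    by_cases h0 : row.getD n 0 = 0
    · have hget : row[n] = 0 := by rwa [hgd] at h0
      rw [if_pos ⟨Nat.succ_pos n, h0⟩, ih (Nat.le_of_lt hn), htake, leadZeros, if_pos hget]
      push_cast; ring
    · have hget : ¬ row[n] = 0 := by rwa [hgd] at h0
      rw [if_neg (by tauto), htake, leadZeros, if_neg hget]
      simp

theorem tz_eq (row : List Int) : tzLoopA row.reverse 0 = tzLoopB row row.length := by
  rw [tzLoopA_eq, tzLoopB_eq row row.length (le_refl _)]
  simp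

theorem find_eq (A : List Int) (need : Int) : ∀ j : Nat, findA A need j = findB A need j := by
  intro j
  induction hd : A.length - j generalizing j with
  | zero =>
    rw [findA, findB]
    have h : ¬ j < A.length := by omega
    rw [if_neg h, if_neg h]
  | succ n ih =>
    rw [findA, findB]
    by_cases hj : j < A.length
    · rw [if_pos hj, if_pos hj]
      by_cases hge : A.getD j 0 ≥ need
      · rw [if_pos hge, if_pos hge]
      · rw [if_neg hge, if_neg hge, ih (j + 1) (by omega)]
    · rw [if_neg hj, if_neg hj]

theorem findA_some (A : List Int) (need : Int) : ∀ j idx : Nat,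
    findA A need j = some idx → j ≤ idx ∧ idx < A.length := by
  intro j
  induction hd : A.length - j generalizing j with
  | zero =>
    intro idx h
    rw [findA] at h
    have hj : ¬ j < A.length := by omega
    rw [if_neg hj] at h
    exact absurd h (by simp)
  | succ n ih =>
    intro idx h
    rw [findA] at h
    by_cases hj : j < A.length
    · rw [if_pos hj] at h
      by_cases hge : A.getD j 0 ≥ need
      · rw [if_pos hge] at h
        obtain rfl : j = idx := by simpa using h
        omega
      · rw [if_neg hge] at h
        have := ih (j + 1) (by omega) idx h
        omega
    · rw [if_neg hj] at h
      exact absurd h (by simp)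

-- the bubble loop moves the element at the right end of 'mid ++ [v]' to the front, costing mid.length
theorem swapLoopA_insert (pre : List Int) : ∀ (mid : List Int) (v : Int) (post : List Int) (ret : Int),
    swapLoopA (pre ++ mid ++ v :: post) ret pre.length (pre.length + mid.length) =
      (pre ++ v :: (mid ++ post), ret + (mid.length : Int)) := by
  intro mid
  induction mid using List.reverseRecOn with
  | nil =>
    intro v post ret
    rw [swapLoopA]
    simp
  | append_singleton ms w ih =>
    intro v post ret
    rw [swapLoopA]
    have hi : pre.length < pre.length + (ms ++ [w]).length := by simp
    rw [if_pos hi]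
    have hj : pre.length + (ms ++ [w]).length = (pre ++ ms).length + 1 := by simp; omega
    have hform : pre ++ (ms ++ [w]) ++ v :: post = (pre ++ ms) ++ w :: v :: post := by simp
    have hgetw : (pre ++ (ms ++ [w]) ++ v :: post).getD (pre.length + (ms ++ [w]).length - 1) 0 = w := by
      rw [hform, hj]
      simp only [Nat.add_sub_cancel]
      rw [List.getD_eq_getElem?_getD, List.getElem?_append_right (le_refl _)]
      simp
    have hgetv : (pre ++ (ms ++ [w]) ++ v :: post).getD (pre.length + (ms ++ [w]).length) 0 = v := by
      rw [hform, hj]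
      rw [List.getD_eq_getElem?_getD, List.getElem?_append_right (by omega)]
      simp
    rw [hgetw, hgetv]
    have hset : ((pre ++ (ms ++ [w]) ++ v :: post).set (pre.length + (ms ++ [w]).length) w).set
        (pre.length + (ms ++ [w]).length - 1) v = pre ++ ms ++ v :: w :: post := by
      rw [hform, hj]
      simp only [Nat.add_sub_cancel]
      rw [List.set_append_right _ _ (by omega), List.set_append_right _ _ (le_refl _)]
      simp
    rw [hset]
    have hj' : pre.length + (ms ++ [w]).length - 1 = pre.length + ms.length := by simp
    rw [hj', ih v (w :: post) (ret + 1)]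
    have hms : ms ++ w :: post = (ms ++ [w]) ++ post := by simp
    rw [hms]
    simp
    ring

-- index form of the previous lemma
theorem swapLoopA_eq (A : List Int) (ret : Int) (i idx : Nat) (hi : i ≤ idx) (hidx : idx < A.length) :
    swapLoopA A ret i idx =
      (PySem.List.insert (A.eraseIdx idx) (i : Int) (A.getD idx 0), ret + ((idx : Int) - (i : Int))) := by
  have hpre : (A.take i).length = i := by
    rw [List.length_take]
    omega
  have hmidlen : ((A.take idx).drop i).length = idx - i := by
    rw [List.length_drop, List.length_take]
    omega
  have htakesplit : A.take idx = A.take i ++ (A.take idx).drop i := by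
    have h1 : (A.take idx).take i = A.take i := by
      rw [List.take_take]
      congr 1
      omega
    conv_lhs => rw [← List.take_append_drop i (A.take idx)]
    rw [h1]
  have hdecomp : A = A.take i ++ (A.take idx).drop i ++ A[idx] :: A.drop (idx + 1) := by
    conv_lhs => rw [← List.take_append_drop idx A]
    rw [List.drop_eq_getElem_cons hidx]
    conv_lhs => rw [htakesplit]
  have hgetidx : A.getD idx 0 = A[idx] := by
    rw [List.getD_eq_getElem?_getD, List.getElem?_eq_getElem hidx, Option.getD_some]
  have herase : A.eraseIdx idx = A.take i ++ ((A.take idx).drop i ++ A.drop (idx + 1)) := by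
    rw [List.eraseIdx_eq_take_drop_succ]
    conv_lhs => rw [htakesplit]
    simp
  have hErLen : i ≤ (A.eraseIdx idx).length := by
    rw [herase, List.length_append, hpre]
    omega
  have hins : PySem.List.insert (A.eraseIdx idx) (i : Int) (A.getD idx 0)
      = A.take i ++ A[idx] :: ((A.take idx).drop i ++ A.drop (idx + 1)) := by
    rw [PySem.List.insert_natCast _ _ _ hErLen, hgetidx, herase,
      List.take_left' hpre, List.drop_left' hpre]
  have hmain := swapLoopA_insert (A.take i) ((A.take idx).drop i) A[idx] (A.drop (idx + 1)) ret
  rw [hpre, hmidlen] at hmain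
  have hidxeq : i + (idx - i) = idx := by omega
  rw [hidxeq] at hmain
  conv_lhs => rw [hdecomp]
  rw [hmain, hins]
  have hcast : ((idx - i : Nat) : Int) = (idx : Int) - (i : Int) := by omega
  rw [hcast]

theorem loop_eq (grid : List (List Int)) : ∀ (i : Nat) (A : List Int) (ret : Int),
    loopA grid A ret i = loopB grid A ret i := by
  intro i
  induction hd : grid.length - i generalizing i with
  | zero =>
    intro A ret
    rw [loopA, loopB]
    have h : ¬ i < grid.length := by omega
    rw [if_neg h, if_neg h]
  | succ n ih =>
    intro A ret
    rw [loopA, loopB]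
    by_cases hi : i < grid.length
    · rw [if_pos hi, if_pos hi]
      by_cases hge : A.getD i 0 ≥ ((grid.getD i []).length : Int) - ((i : Int) + 1)
      · rw [if_pos hge, if_pos hge, ih (i + 1) (by omega)]
      · rw [if_neg hge, if_neg hge, ← find_eq]
        cases hfind : findA A (((grid.getD i []).length : Int) - ((i : Int) + 1)) (i + 1) with
        | none => rfl
        | some idx =>
          obtain ⟨hle, hlt⟩ := findA_some _ _ _ _ hfind
          simp only [swapLoopA_eq A ret i idx (by omega) hlt]
          exact ih (i + 1) (by omega) _ _
    · rw [if_neg hi, if_neg hi]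

-- ===== VERDICT (by name: the statement is the Claim_ definition above) =====
theorem minSwaps_spec : Claim_equal_minSwaps := by
  intro grid _
  unfold Spec_minSwaps minSwaps minSwaps_alt
  rw [List.map_congr_left (fun row _ => tz_eq row), loop_eq]
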